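-- pv_equiv track=rewrite | github.com/b-o-r-m-a-l-e-y/dsp-experiments | dspfunc.py | QPSK_generate
-- ===== SOURCE A (Python) =====
-- def QPSK_generate(nsymbols,samples_in_symbol,bit_stream):
--     samples_i = []
--     samples_q = []
--     q_sample = 0
--     i_sample = 0
--     #Starting bits modulating
--     for k in range(int(nsymbols)):
--         if (k%2 == 0): #If odd element, q bit must be changed
--             if bit_stream[k]==0:
--                 q_sample = -1
--             else:
--                 q_sample = bit_stream[k]
--         else:
--             if bit_stream[k]==0:
--                 i_sample = -1
--             else:
--                 i_sample = bit_stream[k]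
--         for j in range(int(samples_in_symbol)):
--             samples_i.append(i_sample)
--             samples_q.append(q_sample)
--     return samples_i,samples_q
-- ===== SOURCE B (Python) =====
-- def QPSK_generate(nsymbols, samples_in_symbol, bit_stream):
--     # Phase 1: one pass building per-symbol (i, q) pairs with forward fill.
--     symbols = []
--     i_sample = 0
--     q_sample = 0
--     for k in range(int(nsymbols)):
--         bit = bit_stream[k]
--         value = -1 if bit == 0 else bit
--         if k % 2 == 0:
--             q_sample = value
--         else:
--             i_sample = value
--         symbols.append((i_sample, q_sample))
--     # Phase 2: repeat each symbol value samples_in_symbol times.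
--     rep = int(samples_in_symbol)
--     samples_i = [i for (i, _) in symbols for _ in range(rep)]
--     samples_q = [q for (_, q) in symbols for _ in range(rep)]
--     return samples_i, samples_q
-- ===== Notes on version B (the rewrite author's own statement) =====
-- stated objective: alternative
-- what changed: B splits the work into two phases: one pass builds a symbol-level list of (i,q) pairs with forward fill, then each branch's sample stream is produced by flattening that list with per-symbol repetition, instead of A's nested per-symbol sample-append loop.
import Mathlib
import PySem

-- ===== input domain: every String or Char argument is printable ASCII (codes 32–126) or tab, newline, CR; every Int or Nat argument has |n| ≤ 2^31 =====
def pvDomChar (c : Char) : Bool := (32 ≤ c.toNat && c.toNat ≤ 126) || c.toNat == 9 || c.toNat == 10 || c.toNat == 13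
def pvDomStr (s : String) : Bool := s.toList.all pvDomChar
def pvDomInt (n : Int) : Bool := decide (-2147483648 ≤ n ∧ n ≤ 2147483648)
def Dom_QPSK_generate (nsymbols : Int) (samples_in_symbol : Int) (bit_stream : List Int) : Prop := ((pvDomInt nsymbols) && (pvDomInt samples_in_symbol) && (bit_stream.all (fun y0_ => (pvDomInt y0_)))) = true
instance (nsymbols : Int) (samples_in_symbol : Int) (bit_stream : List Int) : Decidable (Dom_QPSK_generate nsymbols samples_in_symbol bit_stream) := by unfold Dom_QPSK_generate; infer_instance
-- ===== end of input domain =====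

-- B replaces A's nested per-symbol sample-append loop by two phases: one pass
-- building a symbol-level list of (i,q) pairs, then flattening it with
-- per-symbol repetition (objective: alternative decomposition, same cost).

-- ===== PORT A =====
-- A's loop body: update (q,i) from bit_stream[k], then append i/q samples_in_symbol times.
def pvStepA (samples_in_symbol : Int) (bit_stream : List Int)
    (st : List Int × List Int × Int × Int) (k : Int) : List Int × List Int × Int × Int :=
  let si := st.1; let sq := st.2.1; let q := st.2.2.1; let i := st.2.2.2
  let b := (PySem.List.pyGet? bit_stream k).getD 0   -- Pre_ guarantees the index is in range
  let qi : Int × Int :=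
    if PySem.Int.mod k 2 = 0 then (if b = 0 then (-1) else b, i)
    else (q, if b = 0 then (-1) else b)
  let inner := (PySem.List.pyRange 0 samples_in_symbol 1).foldl
      (fun (p : List Int × List Int) _ => (p.1 ++ [qi.2], p.2 ++ [qi.1])) (si, sq)
  (inner.1, inner.2, qi.1, qi.2)

def QPSK_generate (nsymbols : Int) (samples_in_symbol : Int) (bit_stream : List Int) : List Int × List Int :=
  let st := (PySem.List.pyRange 0 nsymbols 1).foldl (pvStepA samples_in_symbol bit_stream) ([], [], 0, 0)
  (st.1, st.2.1)

-- ===== PORT B =====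
-- B phase 1 body: update (i,q) from bit_stream[k] and append the pair to the symbol list.
def pvStepB (bit_stream : List Int)
    (st : List (Int × Int) × Int × Int) (k : Int) : List (Int × Int) × Int × Int :=
  let syms := st.1; let i := st.2.1; let q := st.2.2
  let b := (PySem.List.pyGet? bit_stream k).getD 0   -- Pre_ guarantees the index is in range
  let v : Int := if b = 0 then (-1) else b
  let iq : Int × Int := if PySem.Int.mod k 2 = 0 then (i, v) else (v, q)
  (syms ++ [iq], iq.1, iq.2)

def QPSK_generate_alt (nsymbols : Int) (samples_in_symbol : Int) (bit_stream : List Int) : List Int × List Int :=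
  let syms := ((PySem.List.pyRange 0 nsymbols 1).foldl (pvStepB bit_stream) ([], 0, 0)).1
  (syms.flatMap (fun p => (PySem.List.pyRange 0 samples_in_symbol 1).map (fun _ => p.1)),
   syms.flatMap (fun p => (PySem.List.pyRange 0 samples_in_symbol 1).map (fun _ => p.2)))

-- ===== PRECONDITION & SPEC =====
-- Pre_ excludes exactly the inputs where A raises IndexError: bit_stream[k] for k < nsymbols.
def Pre_QPSK_generate (nsymbols : Int) (samples_in_symbol : Int) (bit_stream : List Int) : Prop :=
  nsymbols ≤ (bit_stream.length : Int)
instance (nsymbols : Int) (samples_in_symbol : Int) (bit_stream : List Int) : Decidable (Pre_QPSK_generate nsymbols samples_in_symbol bit_stream) := by unfold Pre_QPSK_generate; infer_instance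

def pvWitness_QPSK_generate : Int × Int × List Int := (3, 2, [1, 0, 5])

def Spec_QPSK_generate (nsymbols : Int) (samples_in_symbol : Int) (bit_stream : List Int) (out : List Int × List Int) : Prop := out = QPSK_generate_alt nsymbols samples_in_symbol bit_stream
instance (nsymbols : Int) (samples_in_symbol : Int) (bit_stream : List Int) (out : List Int × List Int) : Decidable (Spec_QPSK_generate nsymbols samples_in_symbol bit_stream out) := by unfold Spec_QPSK_generate; infer_instance

-- ===== CLAIM (what is proved, stated in full; the proofs are below) =====
def Claim_equal_QPSK_generate : Prop := ∀ (nsymbols : Int) (samples_in_symbol : Int) (bit_stream : List Int), Dom_QPSK_generate nsymbols samples_in_symbol bit_stream → Pre_QPSK_generate nsymbols samples_in_symbol bit_stream → Spec_QPSK_generate nsymbols samples_in_symbol bit_stream (QPSK_generate nsymbols samples_in_symbol bit_stream)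

-- ===== LEMMAS AND PROOFS =====

-- A's inner sample loop appends a constant to each stream once per iteration.
lemma pvInnerLoop (l : List Int) (i q : Int) : ∀ (si sq : List Int),
    l.foldl (fun (p : List Int × List Int) _ => (p.1 ++ [i], p.2 ++ [q])) (si, sq)
      = (si ++ l.map (fun _ => i), sq ++ l.map (fun _ => q)) := by
  induction l with
  | nil => intro si sq; simp
  | cons a t ih => intro si sq; simp [List.foldl_cons, ih]

-- Loop invariant: A's running streams are B's symbol list flattened, and the
-- running (q,i) / (i,q) states coincide.
lemma pvMain (samples_in_symbol : Int) (bit_stream : List Int) (ks : List Int) :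
    ∀ (syms : List (Int × Int)) (i q : Int),
    ks.foldl (pvStepA samples_in_symbol bit_stream)
        (syms.flatMap (fun p => (PySem.List.pyRange 0 samples_in_symbol 1).map (fun _ => p.1)),
         syms.flatMap (fun p => (PySem.List.pyRange 0 samples_in_symbol 1).map (fun _ => p.2)),
         q, i)
      = (let r := ks.foldl (pvStepB bit_stream) (syms, i, q)
         (r.1.flatMap (fun p => (PySem.List.pyRange 0 samples_in_symbol 1).map (fun _ => p.1)),
          r.1.flatMap (fun p => (PySem.List.pyRange 0 samples_in_symbol 1).map (fun _ => p.2)),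
          r.2.2, r.2.1)) := by
  induction ks with
  | nil => intro syms i q; simp
  | cons k t ih =>
    intro syms i q
    simp only [List.foldl_cons]
    by_cases hk : PySem.Int.mod k 2 = 0 <;>
      simp only [pvStepA, pvStepB, hk, if_true, if_false, pvInnerLoop] <;>
      rw [← ih] <;> simp

theorem QPSK_generate_spec : Claim_equal_QPSK_generate := by
  intro nsymbols samples_in_symbol bit_stream _ _
  unfold Spec_QPSK_generate QPSK_generate QPSK_generate_alt
  have h := pvMain samples_in_symbol bit_stream (PySem.List.pyRange 0 nsymbols 1) [] 0 0
  simp only [List.flatMap_nil] at h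
  simp [h]
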